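-- pv_equiv track=rewrite | github.com/mahdibayouli/Probability_Calculator | prob_calculator.py | bingo
-- ===== SOURCE A (Python) =====
-- def list_to_dict(drawn):
--     result = dict()
--     for item in drawn:
--         if(item in result):
--             result[item]+=1
--         else:
--             result[item]=1
--     return result
--
-- def bingo(drawn, expected):
--     drawn_dict = list_to_dict(drawn)
--     for k,v in expected.items():
--         if(k in drawn_dict):
--             if(drawn_dict[k] < v):
--                 return 0
--         else:
--             return 0
--     return 1
-- ===== SOURCE B (Python) =====
-- def bingo(drawn, expected):
--     # Cross-off pass: one sweep over drawn, decrementing/deleting outstanding needs;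
--     # success iff nothing remains outstanding.
--     remaining = dict(expected.items())
--     for item in drawn:
--         if item in remaining:
--             if remaining[item] <= 1:
--                 del remaining[item]
--             else:
--                 remaining[item] -= 1
--     return 0 if remaining else 1
-- ===== Notes on version B (the rewrite author's own statement) =====
-- stated objective: alternative
-- what changed: Inverts the direction of the computation: instead of counting drawn into a table and then scanning expected against it, B makes one cross-off sweep over drawn that decrements/deletes outstanding expected needs and succeeds iff the needs dict ends empty.
import Mathlib
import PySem

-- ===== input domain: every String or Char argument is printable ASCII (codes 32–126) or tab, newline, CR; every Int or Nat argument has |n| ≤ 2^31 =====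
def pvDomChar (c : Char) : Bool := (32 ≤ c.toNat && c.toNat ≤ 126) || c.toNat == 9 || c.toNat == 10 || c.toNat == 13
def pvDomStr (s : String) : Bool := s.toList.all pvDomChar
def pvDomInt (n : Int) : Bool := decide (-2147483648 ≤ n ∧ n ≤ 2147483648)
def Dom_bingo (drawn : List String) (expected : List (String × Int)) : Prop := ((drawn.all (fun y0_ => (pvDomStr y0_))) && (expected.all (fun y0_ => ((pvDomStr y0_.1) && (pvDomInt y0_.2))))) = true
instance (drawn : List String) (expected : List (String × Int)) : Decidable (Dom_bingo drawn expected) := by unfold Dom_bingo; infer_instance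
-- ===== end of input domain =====

-- B inverts the computation: instead of counting drawn into a table and scanning expected
-- against it, one cross-off sweep over drawn decrements/deletes outstanding expected needs
-- and succeeds iff nothing remains (alternative decomposition, same exact behaviour).

-- ===== PORT A =====
-- helper list_to_dict: build a count dict, branching on membership like the Python
def listToDict (drawn : List String) : PySem.Dict String Int :=
  drawn.foldl
    (fun result item =>
      if result.contains item then result.modify item 0 (· + 1)
      else result.insert item 1)
    PySem.Dict.empty

-- the `for k, v in expected.items():` loop with its early returns
def bingoLoop (drawnDict : PySem.Dict String Int) : List (String × Int) → Int
  | [] => 1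
  | (k, v) :: rest =>
    if drawnDict.contains k then
      match drawnDict.get? k with
      | some c => if c < v then 0 else bingoLoop drawnDict rest
      | none => 0          -- unreachable: contains k holds
    else 0

def bingo (drawn : List String) (expected : List (String × Int)) : Int :=
  let drawnDict := listToDict drawn
  bingoLoop drawnDict (PySem.Dict.ofList expected).items

-- ===== PORT B =====
-- the body of `for item in drawn:` — decrement the outstanding need, deleting it at ≤ 1
def crossOff (remaining : PySem.Dict String Int) (item : String) : PySem.Dict String Int :=
  if remaining.contains item then
    if remaining.getD item 0 ≤ 1 then remaining.erase item
    else remaining.modify item 0 (· - 1)   -- remaining[item] -= 1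
  else remaining

def bingo_alt (drawn : List String) (expected : List (String × Int)) : Int :=
  let remaining := drawn.foldl crossOff (PySem.Dict.ofList expected)
  if remaining.items.isEmpty then 1 else 0

-- ===== PRECONDITION & SPEC =====
def Spec_bingo (drawn : List String) (expected : List (String × Int)) (out : Int) : Prop := out = bingo_alt drawn expected
instance (drawn : List String) (expected : List (String × Int)) (out : Int) : Decidable (Spec_bingo drawn expected out) := by unfold Spec_bingo; infer_instance

-- ===== CLAIM (what is proved, stated in full; the proofs are below) =====
def Claim_equal_bingo : Prop := ∀ (drawn : List String) (expected : List (String × Int)), Dom_bingo drawn expected → Spec_bingo drawn expected (bingo drawn expected)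

-- ===== LEMMAS AND PROOFS =====

-- ---- generic facts about Dict.erase (none are provided by PySem) ----
theorem find?_filter_key_self (l : List (String × Int)) (k : String) :
    (l.filter (fun p => !(p.1 == k))).find? (fun p => p.1 == k) = none := by
  induction l with
  | nil => rfl
  | cons p rest ih =>
    by_cases h : p.1 = k
    · simp [h, ih]
    · simp [h, ih]

theorem find?_filter_key_ne (l : List (String × Int)) (k k' : String) (h : k' ≠ k) :
    (l.filter (fun p => !(p.1 == k))).find? (fun p => p.1 == k') =
      l.find? (fun p => p.1 == k') := by
  induction l with
  | nil => rfl
  | cons p rest ih =>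
    by_cases hp : p.1 = k
    · simp [hp, Ne.symm h, ih]
    · by_cases hp' : p.1 = k'
      · simp [hp', h]
      · simp [hp, hp', ih]

theorem get?_erase (d : PySem.Dict String Int) (k k' : String) :
    (d.erase k).get? k' = if k' = k then none else d.get? k' := by
  by_cases h : k' = k
  · subst h
    simp only [PySem.Dict.erase, PySem.Dict.get?]
    rw [find?_filter_key_self]
    rfl
  · simp [PySem.Dict.erase, PySem.Dict.get?, find?_filter_key_ne d.items k k' h, h]

theorem items_eq_nil_iff_get? (d : PySem.Dict String Int) :
    d.items = [] ↔ ∀ k, d.get? k = none := by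
  constructor
  · intro h k; simp [PySem.Dict.get?, h]
  · intro h
    cases hd : d.items with
    | nil => rfl
    | cons p rest =>
      have := h p.1
      simp [PySem.Dict.get?, hd] at this

-- ---- A's count table ----
theorem getD_listToDict_fold (l : List String) (d : PySem.Dict String Int) (k : String) :
    (l.foldl
      (fun result item =>
        if result.contains item then result.modify item 0 (· + 1)
        else result.insert item 1) d).getD k 0 = d.getD k 0 + l.count k := by
  induction l generalizing d with
  | nil => simp
  | cons x xs ih =>
    simp only [List.foldl_cons, ih, List.count_cons]
    by_cases hk : k = x
    · subst hk
      simp only [beq_self_eq_true, if_pos]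
      by_cases hc : d.contains k = true
      · rw [if_pos hc, PySem.Dict.getD_modify_self]
        push_cast; ring
      · rw [if_neg hc, PySem.Dict.getD_insert_self,
            PySem.Dict.getD_of_not_contains d 0 (by simpa using hc)]
        push_cast; ring
    · have hbk : (k == x) = false := by simp [hk]
      by_cases hc : d.contains x = true
      · rw [if_pos hc, PySem.Dict.getD_modify_of_ne d 0 _ hk]
        simp [Ne.symm hk]
      · rw [if_neg hc, PySem.Dict.getD_insert_of_ne d 1 0 hk]
        simp [Ne.symm hk]

theorem contains_listToDict_fold (l : List String) (d : PySem.Dict String Int) (k : String) :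
    (l.foldl
      (fun result item =>
        if result.contains item then result.modify item 0 (· + 1)
        else result.insert item 1) d).contains k = (d.contains k || l.contains k) := by
  induction l generalizing d with
  | nil => simp
  | cons x xs ih =>
    simp only [List.foldl_cons, ih, List.contains_cons]
    by_cases hc : d.contains x = true
    · rw [if_pos hc, PySem.Dict.contains_modify]
      by_cases hk : k = x
      · subst hk; simp [hc]
      · rw [Bool.or_left_comm, Bool.or_assoc]
    · rw [if_neg hc, PySem.Dict.contains_insert]
      by_cases hk : k = x
      · subst hk; simp
      · rw [Bool.or_left_comm, Bool.or_assoc]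

theorem getD_listToDict (drawn : List String) (k : String) :
    (listToDict drawn).getD k 0 = drawn.count k := by
  unfold listToDict
  rw [getD_listToDict_fold]
  simp [PySem.Dict.getD_empty]

theorem contains_listToDict (drawn : List String) (k : String) :
    (listToDict drawn).contains k = drawn.contains k := by
  unfold listToDict
  rw [contains_listToDict_fold]
  simp [PySem.Dict.contains_empty]

-- A's loop returns 1 exactly when every expected item is covered by drawn
theorem bingoLoop_char (drawn : List String) (items : List (String × Int)) :
    bingoLoop (listToDict drawn) items =
      if items.all (fun p => drawn.contains p.1 && decide (p.2 ≤ (drawn.count p.1 : Int)))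
      then 1 else 0 := by
  induction items with
  | nil => rfl
  | cons p rest ih =>
    obtain ⟨k, v⟩ := p
    simp only [bingoLoop, List.all_cons]
    by_cases h : drawn.contains k = true
    · have hc : (listToDict drawn).contains k = true := by rw [contains_listToDict]; exact h
      have hs : ((listToDict drawn).get? k).isSome := by
        rw [← PySem.Dict.contains_eq_isSome_get?]; exact hc
      obtain ⟨c, hcv⟩ := Option.isSome_iff_exists.mp hs
      have hval : c = (drawn.count k : Int) := by
        have := getD_listToDict drawn k
        rw [PySem.Dict.getD_eq_get?_getD, hcv] at this
        simpa using this
      rw [hc, hcv, hval, if_pos rfl,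
          show (match some ((drawn.count k : Int)) with
                | some c => if c < v then (0 : Int) else bingoLoop (listToDict drawn) rest
                | none => 0) =
              if ((drawn.count k : Int)) < v then 0 else bingoLoop (listToDict drawn) rest from rfl]
      by_cases hv : (drawn.count k : Int) < v
      · have hd : decide (v ≤ (drawn.count k : Int)) = false := by
          simp [not_le.mpr hv]
        rw [if_pos hv]
        simp only [h, hd, Bool.false_and, Bool.and_false]
        simp
      · have hd : decide (v ≤ (drawn.count k : Int)) = true := decide_eq_true (not_lt.mp hv)
        rw [if_neg hv, ih]
        simp only [h, hd, Bool.true_and]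
    · have hc : (listToDict drawn).contains k = false := by
        rw [contains_listToDict]; simpa using h
      have h' : drawn.contains k = false := by simpa using h
      rw [hc]
      simp only [h', Bool.false_and]
      simp

-- ---- B's cross-off sweep ----
-- what one key's stored need becomes after c occurrences of that key are crossed off
def sim : Option Int → Nat → Option Int
  | o, 0 => o
  | none, _ + 1 => none
  | some v, c + 1 => if v ≤ 1 then sim none c else sim (some (v - 1)) c

theorem sim_none (c : Nat) : sim none c = none := by
  cases c <;> rfl

theorem foldl_crossOff_get? (l : List String) (d : PySem.Dict String Int) (k : String) :
    (l.foldl crossOff d).get? k = sim (d.get? k) (l.count k) := by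
  induction l generalizing d with
  | nil => rfl
  | cons x xs ih =>
    simp only [List.foldl_cons, ih]
    by_cases hx : k = x
    · subst hx
      rw [List.count_cons_self]
      by_cases hc : d.contains k = true
      · have hs : (d.get? k).isSome := by
          rw [← PySem.Dict.contains_eq_isSome_get?]; exact hc
        obtain ⟨v, hv⟩ := Option.isSome_iff_exists.mp hs
        have hgd : d.getD k 0 = v := by
          rw [PySem.Dict.getD_eq_get?_getD, hv]; rfl
        rw [hv, show sim (some v) (xs.count k + 1) =
              if v ≤ 1 then sim none (xs.count k) else sim (some (v - 1)) (xs.count k) from rfl]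
        unfold crossOff
        rw [if_pos hc, hgd]
        by_cases h1 : v ≤ 1
        · rw [if_pos h1, if_pos h1, get?_erase, if_pos rfl, sim_none]
        · rw [if_neg h1, if_neg h1,
              show d.modify k 0 (· - 1) = d.insert k (d.getD k 0 - 1) from rfl,
              PySem.Dict.get?_insert_self, hgd]
      · have hn : d.get? k = none := by
          rw [PySem.Dict.get?_eq_none_iff_contains]; simpa using hc
        unfold crossOff
        rw [if_neg hc, hn, sim_none, sim_none]
    · have hbk : (x == k) = false := beq_eq_false_iff_ne.mpr (fun e => hx e.symm)
      rw [List.count_cons, hbk, if_neg (by simp), Nat.add_zero]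
      have hstep : (crossOff d x).get? k = d.get? k := by
        unfold crossOff
        by_cases hc : d.contains x = true
        · rw [if_pos hc]
          by_cases h1 : d.getD x 0 ≤ 1
          · rw [if_pos h1, get?_erase, if_neg hx]
          · rw [if_neg h1,
                show d.modify x 0 (· - 1) = d.insert x (d.getD x 0 - 1) from rfl,
                PySem.Dict.get?_insert_of_ne _ _ hx]
        · rw [if_neg hc]
      rw [hstep]

theorem sim_some_eq_none_iff (c : Nat) (v : Int) :
    sim (some v) c = none ↔ 1 ≤ c ∧ v ≤ (c : Int) := by
  induction c generalizing v with
  | zero => simp [sim]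
  | succ n ih =>
    by_cases h1 : v ≤ 1
    · rw [sim, if_pos h1, sim_none]
      simp only [true_iff]
      refine ⟨by omega, ?_⟩
      have h0 : (0 : Int) ≤ (n : Int) := Int.natCast_nonneg n
      push_cast
      omega
    · rw [sim, if_neg h1, ih]
      constructor
      · rintro ⟨ha, hb⟩
        refine ⟨by omega, ?_⟩
        push_cast
        omega
      · rintro ⟨ha, hb⟩
        push_cast at hb
        exact ⟨by omega, by omega⟩

-- the sweep's leftover dict is empty exactly when every expected item is covered
theorem crossOff_empty_iff (drawn : List String) (expected : List (String × Int)) :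
    (drawn.foldl crossOff (PySem.Dict.ofList expected)).items = [] ↔
      ((PySem.Dict.ofList expected).items.all
        (fun p => drawn.contains p.1 && decide (p.2 ≤ (drawn.count p.1 : Int)))) = true := by
  rw [items_eq_nil_iff_get?]
  have hnd : (PySem.Dict.ofList expected).keys.Nodup := PySem.Dict.nodup_keys_ofList expected
  constructor
  · intro h
    rw [List.all_eq_true]
    rintro ⟨k, v⟩ hmem
    have hget : (PySem.Dict.ofList expected).get? k = some v :=
      PySem.Dict.get?_of_mem_items _ hmem hnd
    have := h k
    rw [foldl_crossOff_get?, hget, sim_some_eq_none_iff] at this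
    obtain ⟨h1, h2⟩ := this
    have hk : k ∈ drawn := by
      have : 0 < drawn.count k := by omega
      exact List.count_pos_iff.mp this
    simp [hk, h2]
  · intro h k
    rw [foldl_crossOff_get?]
    cases hget : (PySem.Dict.ofList expected).get? k with
    | none => exact sim_none _
    | some v =>
      have hmem : (k, v) ∈ (PySem.Dict.ofList expected).items :=
        PySem.Dict.mem_items_of_get?_eq_some _ hget
      rw [List.all_eq_true] at h
      have := h _ hmem
      simp only [Bool.and_eq_true, decide_eq_true_eq] at this
      obtain ⟨hc, hle⟩ := this
      rw [sim_some_eq_none_iff]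
      have hk : k ∈ drawn := by simpa using hc
      have : 0 < drawn.count k := List.count_pos_iff.mpr hk
      exact ⟨by omega, hle⟩

-- ===== VERDICT (by name: the statement is the Claim_ definition above) =====
theorem bingo_spec : Claim_equal_bingo := by
  intro drawn expected _
  unfold Spec_bingo bingo bingo_alt
  simp only []
  rw [bingoLoop_char]
  by_cases h : ((PySem.Dict.ofList expected).items.all
      (fun p => drawn.contains p.1 && decide (p.2 ≤ (drawn.count p.1 : Int)))) = true
  · rw [if_pos h]
    rw [← crossOff_empty_iff] at h
    simp [h]
  · rw [if_neg h]
    have : ¬ (drawn.foldl crossOff (PySem.Dict.ofList expected)).items = [] := by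
      rw [crossOff_empty_iff]; exact h
    simp [List.isEmpty_iff, this]
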